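-- pv_equiv track=rewrite | github.com/xl666/recursosEstructuras24 | parcial1/estudiantes/Turan/codigos hechos en clase/3. semana/bug1_Ozbek_Turan.py | contar_sin_unos
-- ===== SOURCE A (Python) =====
-- def contar_sin_unos(lista):
--     total = len(lista)
--     i = 0
--     suma = 0
--
--     while i < total:
--         elemento = lista[i]
--         if elemento==1: #ignorando el valor de 1 convertiendo en 0, creo que tambien podria hacer filtrando la lista dentro de otra.
--             elemento=elemento-1
--             #continue ------> esto hacia que el siglo regresara a principio , hay que quitarlo.
--         suma += elemento
--         i += 1
--     return suma
-- ===== SOURCE B (Python) =====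
-- def contar_sin_unos(lista):
--     return sum(lista) - lista.count(1)
-- ===== Notes on version B (the rewrite author's own statement) =====
-- stated objective: simpler
-- what changed: Replaces the hand-indexed while loop with a closed-form combination of two built-in reductions: sum(lista) - lista.count(1), using the identity that each 1 contributes exactly 1 to the plain sum.
import Mathlib
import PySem

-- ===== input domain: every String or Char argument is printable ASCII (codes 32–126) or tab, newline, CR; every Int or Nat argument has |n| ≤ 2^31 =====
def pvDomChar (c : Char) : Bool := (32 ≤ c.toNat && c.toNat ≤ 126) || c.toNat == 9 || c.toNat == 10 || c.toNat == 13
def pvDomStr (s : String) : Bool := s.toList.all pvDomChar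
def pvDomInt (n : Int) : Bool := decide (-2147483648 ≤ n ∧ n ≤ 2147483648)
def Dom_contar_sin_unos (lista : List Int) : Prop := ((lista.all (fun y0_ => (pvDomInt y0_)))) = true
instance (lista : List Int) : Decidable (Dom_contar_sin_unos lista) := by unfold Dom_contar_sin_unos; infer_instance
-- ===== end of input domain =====

-- B replaces the hand-indexed while loop by the closed form sum(lista) - lista.count(1).
-- ===== PORT A =====
-- while i < total: elemento = lista[i]; if elemento == 1: elemento -= 1; suma += elemento; i += 1
def contarA_loop (lista : List Int) (total i : Nat) (suma : Int) : Int :=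
  if _h : i < total then
    let elemento := (PySem.List.pyGet? lista (i : Int)).getD 0
    let elemento := if elemento == 1 then elemento - 1 else elemento
    contarA_loop lista total (i + 1) (suma + elemento)
  else suma
termination_by total - i

def contar_sin_unos (lista : List Int) : Int :=
  contarA_loop lista lista.length 0 0

-- ===== PORT B =====
def contar_sin_unos_alt (lista : List Int) : Int :=
  lista.sum - PySem.List.count lista 1

-- ===== PRECONDITION & SPEC =====
def Spec_contar_sin_unos (lista : List Int) (out : Int) : Prop := out = contar_sin_unos_alt lista
instance (lista : List Int) (out : Int) : Decidable (Spec_contar_sin_unos lista out) := by unfold Spec_contar_sin_unos; infer_instance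

-- ===== CLAIM (what is proved, stated in full; the proofs are below) =====
def Claim_equal_contar_sin_unos : Prop := ∀ (lista : List Int), Dom_contar_sin_unos lista → Spec_contar_sin_unos lista (contar_sin_unos lista)

-- ===== LEMMAS AND PROOFS =====
lemma contarA_loop_drop (lista : List Int) (i : Nat) (suma : Int) (h : i ≤ lista.length) :
    contarA_loop lista lista.length i suma
      = suma + ((lista.drop i).sum - PySem.List.count (lista.drop i) 1) := by
  induction hn : lista.length - i generalizing i suma with
  | zero =>
    have hi : i = lista.length := by omega
    unfold contarA_loop
    simp [hi, List.drop_length, PySem.List.count]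
  | succ n ih =>
    have hi : i < lista.length := by omega
    unfold contarA_loop
    rw [dif_pos hi]
    have hget : PySem.List.pyGet? lista (i : Int) = some lista[i] :=
      PySem.List.pyGet?_ofNat (h := hi)
    have hdrop : lista.drop i = lista[i] :: lista.drop (i + 1) :=
      (List.drop_eq_getElem_cons hi)
    rw [ih (i + 1) _ (by omega) (by omega)]
    simp only [hget, Option.getD_some, hdrop, List.sum_cons, PySem.List.count, List.count_cons]
    by_cases h1 : lista[i] = 1 <;> simp [h1] <;> ring

-- ===== VERDICT (by name: the statement is the Claim_ definition above) =====
theorem contar_sin_unos_spec : Claim_equal_contar_sin_unos := by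
  intro lista _
  unfold Spec_contar_sin_unos contar_sin_unos contar_sin_unos_alt
  rw [contarA_loop_drop lista 0 0 (by omega)]
  simp
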